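-- pv_equiv track=rewrite | github.com/Borda/BIRL | benchmark/utilities/dataset.py | generate_pairing
-- ===== SOURCE A (Python) =====
-- def generate_pairing(count, step_hide=None):
--     """ generate registration pairs with an option of hidden landmarks
--
--     :param int count: total number of samples
--     :param int|None step_hide: hide every N sample
--     :return [(int, int)], [bool]: registration pairs
--
--     >>> generate_pairing(4, None)  # doctest: +NORMALIZE_WHITESPACE
--     ([(0, 1), (0, 2), (0, 3), (1, 2), (1, 3), (2, 3)],
--      [True, True, True, True, True, True])
--     >>> generate_pairing(4, step_hide=3)  # doctest: +NORMALIZE_WHITESPACE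
--     ([(0, 1), (0, 2), (1, 2), (3, 1), (3, 2)],
--      [False, False, True, False, False])
--     """
--     idxs_all = list(range(count))
--     idxs_hide = idxs_all[::step_hide] if step_hide is not None else []
--     # prune image on diagonal and missing both landmarks (target and source)
--     idxs_pairs = [(i, j) for i in idxs_all for j in idxs_all
--                   if i != j and j not in idxs_hide]
--     # prune symmetric image pairs
--     idxs_pairs = [(i, j) for k, (i, j) in enumerate(idxs_pairs)
--                   if (j, i) not in idxs_pairs[:k]]
--     public = [not (i in idxs_hide or j in idxs_hide) for i, j in idxs_pairs]
--     return idxs_pairs, public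
-- ===== SOURCE B (Python) =====
-- def generate_pairing(count, step_hide=None):
--     hide = set(range(count)[::step_hide]) if step_hide is not None else set()
--     pairs, public = [], []
--     for i in range(count):
--         for j in range(count):
--             if i == j or j in hide:
--                 continue
--             if i not in hide and i > j:
--                 continue
--             pairs.append((i, j))
--             public.append(i not in hide)
--     return pairs, public
-- ===== Notes on version B (the rewrite author's own statement) =====
-- stated objective: simpler
-- what changed: B drops A's build-all-pairs-then-prune-by-prefix-scan (the quadratic 'reverse pair seen earlier' membership test over a growing prefix) and emits each pair and its public flag once, in a single nested loop with a direct keep condition over a hide set.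
import Mathlib
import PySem

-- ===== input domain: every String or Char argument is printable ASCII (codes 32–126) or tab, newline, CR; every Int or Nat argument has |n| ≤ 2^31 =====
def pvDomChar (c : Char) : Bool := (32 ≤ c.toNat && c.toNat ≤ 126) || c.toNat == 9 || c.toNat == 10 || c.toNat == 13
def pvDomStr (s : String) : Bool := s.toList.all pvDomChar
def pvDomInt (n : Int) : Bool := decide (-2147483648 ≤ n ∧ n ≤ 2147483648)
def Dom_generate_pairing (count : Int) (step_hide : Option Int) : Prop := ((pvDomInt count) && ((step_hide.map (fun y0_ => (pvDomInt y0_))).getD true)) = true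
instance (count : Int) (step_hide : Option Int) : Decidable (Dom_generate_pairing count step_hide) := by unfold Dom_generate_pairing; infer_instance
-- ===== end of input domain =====

-- B replaces A's build-all-pairs-then-prune-by-prefix-scan with a single nested loop that
-- emits each pair (and its public flag) at most once using a direct keep condition (simpler, one pass).

-- ===== PORT A =====
def generate_pairing (count : Int) (step_hide : Option Int) : (List (Int × Int)) × List Bool :=
  let idxs_all := PySem.List.pyRange 0 count 1
  let idxs_hide : List Int := match step_hide with
    | some s => (PySem.List.slice? idxs_all none none s).getD []
    | none => []
  let idxs_pairs := idxs_all.flatMap (fun i =>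
      (idxs_all.filter (fun j => decide (i ≠ j) && !decide (j ∈ idxs_hide))).map (fun j => (i, j)))
  let idxs_pairs2 := ((PySem.List.enumerate idxs_pairs 0).filter
      (fun kp => !decide ((kp.2.2, kp.2.1) ∈ PySem.List.slice idxs_pairs none (some kp.1)))).map (fun kp => kp.2)
  let pub := idxs_pairs2.map (fun p => !(decide (p.1 ∈ idxs_hide) || decide (p.2 ∈ idxs_hide)))
  (idxs_pairs2, pub)

-- ===== PORT B =====
def generate_pairing_alt (count : Int) (step_hide : Option Int) : (List (Int × Int)) × List Bool :=
  let r := PySem.List.pyRange 0 count 1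
  let hide : PySem.Set Int := match step_hide with
    | some s => PySem.Set.ofList ((PySem.List.slice? r none none s).getD [])
    | none => PySem.Set.empty
  r.foldl (fun acc i =>
    r.foldl (fun acc j =>
      if i = j ∨ j ∈ hide then acc
      else if i ∉ hide ∧ j < i then acc
      else (acc.1 ++ [(i, j)], acc.2 ++ [decide (i ∉ hide)])) acc) ([], [])

-- ===== PRECONDITION & SPEC =====
-- Pre_ excludes only step_hide = 0, on which the Python A raises ValueError (slice step 0); B raises there too.
def Pre_generate_pairing (count : Int) (step_hide : Option Int) : Prop := step_hide ≠ some 0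
instance (count : Int) (step_hide : Option Int) : Decidable (Pre_generate_pairing count step_hide) := by unfold Pre_generate_pairing; infer_instance
def pvWitness_generate_pairing : Int × Option Int := (4, some 3)

def Spec_generate_pairing (count : Int) (step_hide : Option Int) (out : (List (Int × Int)) × List Bool) : Prop := out = generate_pairing_alt count step_hide
instance (count : Int) (step_hide : Option Int) (out : (List (Int × Int)) × List Bool) : Decidable (Spec_generate_pairing count step_hide out) := by unfold Spec_generate_pairing; infer_instance

-- ===== CLAIM (what is proved, stated in full; the proofs are below) =====
def Claim_equal_generate_pairing : Prop := ∀ (count : Int) (step_hide : Option Int), Dom_generate_pairing count step_hide → Pre_generate_pairing count step_hide → Spec_generate_pairing count step_hide (generate_pairing count step_hide)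

-- ===== LEMMAS AND PROOFS =====

-- In a lexicographically strictly sorted list, the prefix before position k holds
-- exactly the members strictly below the k-th element.
lemma pv_mem_take_iff (l : List (Int × Int))
    (hl : l.Pairwise (fun p q => p.1 < q.1 ∨ (p.1 = q.1 ∧ p.2 < q.2)))
    (k : Nat) (hk : k < l.length) (y : Int × Int) :
    y ∈ l.take k ↔ y ∈ l ∧ (y.1 < l[k].1 ∨ (y.1 = l[k].1 ∧ y.2 < l[k].2)) := by
  rw [List.pairwise_iff_getElem] at hl
  constructor
  · intro hy
    obtain ⟨m, hm, hme⟩ := List.mem_iff_getElem.mp hy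
    have hmk : m < k := by have := hm; simp [List.length_take] at this; omega
    have hml : m < l.length := by omega
    have hval : l[m] = y := by simpa [List.getElem_take] using hme
    refine ⟨hval ▸ List.getElem_mem hml, ?_⟩
    have := hl m k hml hk hmk
    rw [hval] at this; exact this
  · rintro ⟨hy, hlt⟩
    obtain ⟨m, hml, hme⟩ := List.mem_iff_getElem.mp hy
    rcases Nat.lt_or_ge m k with hmk | hmk
    · have hm' : m < (l.take k).length := by simp [List.length_take]; omega
      have : (l.take k)[m] = y := by rw [List.getElem_take]; exact hme
      exact this ▸ List.getElem_mem hm'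
    · exfalso
      rcases Nat.eq_or_lt_of_le hmk with heq | hlt'
      · subst heq; rw [hme] at hlt; omega
      · have := hl k m hk hml hlt'
        rw [hme] at this
        rcases hlt with h1 | h1 <;> rcases this with h2 | h2 <;> omega

-- Filtering an enumerated list by an index-dependent test that agrees pointwise with
-- an element test, then dropping the indices, is a plain filter.
lemma pv_filter_enumerate {α : Type} (l : List α) (q : Int → α → Bool) (P : α → Bool)
    (h : ∀ (k : Nat) (hk : k < l.length), q (k : Int) l[k] = P l[k]) :
    ((PySem.List.enumerate l 0).filter (fun kp => q kp.1 kp.2)).map (fun kp => kp.2) = l.filter P := by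
  induction l using List.reverseRecOn with
  | nil => simp [PySem.List.enumerate_nil]
  | append_singleton l a ih =>
      rw [PySem.List.enumerate_append, List.filter_append, List.map_append, List.filter_append]
      have h1 : ∀ (k : Nat) (hk : k < l.length), q (k : Int) l[k] = P l[k] := by
        intro k hk
        have hk' : k < (l ++ [a]).length := by simp; omega
        have := h k hk'
        rwa [List.getElem_append_left hk] at this
      rw [ih h1]
      have h2 : q (l.length : Int) a = P a := by
        have hk' : l.length < (l ++ [a]).length := by simp
        have := h l.length hk'
        rw [List.getElem_append_right (by omega)] at this
        simpa using this
      simp [PySem.List.enumerate_cons, PySem.List.enumerate_nil, List.filter_cons, h2]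
      by_cases hp : P a = true <;> simp [hp]

-- the first comprehension's pairs, as a function of the range list and hide list
def pvPairs1 (R H : List Int) : List (Int × Int) :=
  R.flatMap (fun i => (R.filter (fun j => decide (i ≠ j) && !decide (j ∈ H))).map (fun j => (i, j)))

lemma pv_mem_pairs1 (R H : List Int) (p : Int × Int) :
    p ∈ pvPairs1 R H ↔ p.1 ∈ R ∧ p.2 ∈ R ∧ p.1 ≠ p.2 ∧ p.2 ∉ H := by
  unfold pvPairs1
  simp only [List.mem_flatMap, List.mem_map, List.mem_filter, Bool.and_eq_true,
    decide_eq_true_eq, Bool.not_eq_true', decide_eq_false_iff_not]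
  constructor
  · rintro ⟨i, hi, j, ⟨hj, hij, hjh⟩, rfl⟩
    exact ⟨hi, hj, hij, hjh⟩
  · rintro ⟨h1, h2, h3, h4⟩
    exact ⟨p.1, h1, p.2, ⟨h2, h3, h4⟩, rfl⟩

lemma pv_pairs1_pairwise (count : Int) (H : List Int) :
    (pvPairs1 (PySem.List.pyRange 0 count 1) H).Pairwise
      (fun p q => p.1 < q.1 ∨ (p.1 = q.1 ∧ p.2 < q.2)) := by
  unfold pvPairs1
  rw [List.pairwise_flatMap]
  constructor
  · intro i _
    refine List.Pairwise.map _ ?_ ((PySem.List.pairwise_lt_pyRange_one 0 count).filter _)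
    intro a b hab
    exact Or.inr ⟨rfl, hab⟩
  · refine (PySem.List.pairwise_lt_pyRange_one 0 count).imp_of_mem ?_
    intro a b _ _ hab x hx y hy
    obtain ⟨ja, _, rfl⟩ := List.mem_map.mp hx
    obtain ⟨jb, _, rfl⟩ := List.mem_map.mp hy
    exact Or.inl hab

-- A's second comprehension (prune symmetric pairs via a prefix scan) is a direct filter.
lemma pv_pairs2_eq_filter (count : Int) (H : List Int) :
    ((PySem.List.enumerate (pvPairs1 (PySem.List.pyRange 0 count 1) H) 0).filter
      (fun kp => !decide ((kp.2.2, kp.2.1) ∈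
        PySem.List.slice (pvPairs1 (PySem.List.pyRange 0 count 1) H) none (some kp.1)))).map (fun kp => kp.2)
    = (pvPairs1 (PySem.List.pyRange 0 count 1) H).filter
        (fun p => decide (p.1 ∈ H) || decide (p.1 < p.2)) := by
  set L := pvPairs1 (PySem.List.pyRange 0 count 1) H with hL
  apply pv_filter_enumerate L (fun k p => !decide ((p.2, p.1) ∈ PySem.List.slice L none (some k)))
  intro k hk
  rw [PySem.List.slice_to_natCast]
  have hmem := (pv_mem_pairs1 (PySem.List.pyRange 0 count 1) H L[k]).mp (List.getElem_mem hk)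
  have htake := pv_mem_take_iff L (hL ▸ pv_pairs1_pairwise count H) k hk (L[k].2, L[k].1)
  have hiff : ((L[k].2, L[k].1) ∈ L.take k) ↔ (L[k].1 ∉ H ∧ L[k].2 < L[k].1) := by
    rw [htake, pv_mem_pairs1]
    obtain ⟨h1, h2, h3, h4⟩ := hmem
    constructor
    · rintro ⟨⟨_, _, _, hih⟩, hlt⟩
      refine ⟨hih, ?_⟩
      rcases hlt with h | h
      · exact h
      · exact absurd h.1.symm h3
    · rintro ⟨hih, hlt⟩
      exact ⟨⟨h2, h1, fun e => h3 e.symm, hih⟩, Or.inl hlt⟩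
  obtain ⟨_, _, h3, _⟩ := hmem
  rw [show (!decide ((L[k].2, L[k].1) ∈ L.take k)) = decide (¬ ((L[k].2, L[k].1) ∈ L.take k)) from by simp]
  rw [show (decide (L[k].1 ∈ H) || decide (L[k].1 < L[k].2)) = decide (L[k].1 ∈ H ∨ L[k].1 < L[k].2) from by simp]
  apply decide_eq_decide.mpr
  rw [hiff]
  by_cases hih : L[k].1 ∈ H <;> simp [hih] <;> omega

-- B's nested loop, split into its two independent accumulators and turned into flatMap/filter form.
lemma pv_alt_eq (count : Int) (hide : List Int) :
    (PySem.List.pyRange 0 count 1).foldl (fun acc i =>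
      (PySem.List.pyRange 0 count 1).foldl (fun acc j =>
        if i = j ∨ j ∈ hide then acc
        else if i ∉ hide ∧ j < i then acc
        else (acc.1 ++ [(i, j)], acc.2 ++ [decide (i ∉ hide)])) acc) ([], [])
    = ((PySem.List.pyRange 0 count 1).flatMap (fun i =>
        ((PySem.List.pyRange 0 count 1).filter
          (fun j => decide (¬ (i = j ∨ j ∈ hide) ∧ ¬ (i ∉ hide ∧ j < i)))).map (fun j => (i, j))),
       (PySem.List.pyRange 0 count 1).flatMap (fun i =>
        ((PySem.List.pyRange 0 count 1).filter
          (fun j => decide (¬ (i = j ∨ j ∈ hide) ∧ ¬ (i ∉ hide ∧ j < i)))).map (fun _ => decide (i ∉ hide)))) := by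
  have hinner : ∀ (i : Int) (a : List (Int × Int)) (b : List Bool),
      (PySem.List.pyRange 0 count 1).foldl (fun acc j =>
        if i = j ∨ j ∈ hide then acc
        else if i ∉ hide ∧ j < i then acc
        else (acc.1 ++ [(i, j)], acc.2 ++ [decide (i ∉ hide)])) (a, b)
      = (a ++ ((PySem.List.pyRange 0 count 1).filter
            (fun j => decide (¬ (i = j ∨ j ∈ hide) ∧ ¬ (i ∉ hide ∧ j < i)))).map (fun j => (i, j)),
         b ++ ((PySem.List.pyRange 0 count 1).filter
            (fun j => decide (¬ (i = j ∨ j ∈ hide) ∧ ¬ (i ∉ hide ∧ j < i)))).map (fun _ => decide (i ∉ hide))) := by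
    intro i a b
    have hb : (fun (acc : List (Int × Int) × List Bool) j =>
        if i = j ∨ j ∈ hide then acc
        else if i ∉ hide ∧ j < i then acc
        else (acc.1 ++ [(i, j)], acc.2 ++ [decide (i ∉ hide)]))
        = fun acc j =>
            ((fun (a : List (Int × Int)) j =>
                if ¬ (i = j ∨ j ∈ hide) ∧ ¬ (i ∉ hide ∧ j < i) then a ++ [(i, j)] else a) acc.1 j,
             (fun (b : List Bool) j =>
                if ¬ (i = j ∨ j ∈ hide) ∧ ¬ (i ∉ hide ∧ j < i) then b ++ [decide (i ∉ hide)] else b) acc.2 j) := by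
      funext acc j
      by_cases h1 : i = j ∨ j ∈ hide
      · simp [h1]
      · by_cases h2 : i ∉ hide ∧ j < i <;> simp [h1, h2]
    rw [hb, PySem.List.foldl_prod_mk
        (f := fun (a : List (Int × Int)) j =>
          if ¬ (i = j ∨ j ∈ hide) ∧ ¬ (i ∉ hide ∧ j < i) then a ++ [(i, j)] else a)
        (g := fun (b : List Bool) j =>
          if ¬ (i = j ∨ j ∈ hide) ∧ ¬ (i ∉ hide ∧ j < i) then b ++ [decide (i ∉ hide)] else b),
      PySem.List.foldl_append_ite, PySem.List.foldl_append_ite]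
  have houter : (fun (acc : List (Int × Int) × List Bool) i =>
      (PySem.List.pyRange 0 count 1).foldl (fun acc j =>
        if i = j ∨ j ∈ hide then acc
        else if i ∉ hide ∧ j < i then acc
        else (acc.1 ++ [(i, j)], acc.2 ++ [decide (i ∉ hide)])) acc)
      = fun acc i =>
          ((fun (a : List (Int × Int)) i => a ++ ((PySem.List.pyRange 0 count 1).filter
              (fun j => decide (¬ (i = j ∨ j ∈ hide) ∧ ¬ (i ∉ hide ∧ j < i)))).map (fun j => (i, j))) acc.1 i,
           (fun (b : List Bool) i => b ++ ((PySem.List.pyRange 0 count 1).filter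
              (fun j => decide (¬ (i = j ∨ j ∈ hide) ∧ ¬ (i ∉ hide ∧ j < i)))).map (fun _ => decide (i ∉ hide))) acc.2 i) := by
    funext acc i
    obtain ⟨a, b⟩ := acc
    exact hinner i a b
  rw [houter, PySem.List.foldl_prod_mk
      (f := fun (a : List (Int × Int)) i => a ++ ((PySem.List.pyRange 0 count 1).filter
          (fun j => decide (¬ (i = j ∨ j ∈ hide) ∧ ¬ (i ∉ hide ∧ j < i)))).map (fun j => (i, j)))
      (g := fun (b : List Bool) i => b ++ ((PySem.List.pyRange 0 count 1).filter
          (fun j => decide (¬ (i = j ∨ j ∈ hide) ∧ ¬ (i ∉ hide ∧ j < i)))).map (fun _ => decide (i ∉ hide))),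
    PySem.List.foldl_append_eq_flatMap, PySem.List.foldl_append_eq_flatMap]
  simp

-- pointwise agreement of the two keep conditions
lemma pv_pred_eq (H hide : List Int) (hmem : ∀ x : Int, x ∈ hide ↔ x ∈ H) (i j : Int) :
    ((decide ((i, j).1 ∈ H) || decide ((i, j).1 < (i, j).2)) && (decide (i ≠ j) && !decide (j ∈ H)))
    = decide (¬ (i = j ∨ j ∈ hide) ∧ ¬ (i ∉ hide ∧ j < i)) := by
  by_cases h1 : i ∈ H <;> by_cases h2 : j ∈ H <;> by_cases h3 : i = j <;>
    simp [h1, h2, h3, hmem] <;> omega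

lemma pv_core (count : Int) (H hide : List Int) (hmem : ∀ x : Int, x ∈ hide ↔ x ∈ H) :
    (((PySem.List.enumerate (pvPairs1 (PySem.List.pyRange 0 count 1) H) 0).filter
        (fun kp => !decide ((kp.2.2, kp.2.1) ∈
          PySem.List.slice (pvPairs1 (PySem.List.pyRange 0 count 1) H) none (some kp.1)))).map (fun kp => kp.2),
     (((PySem.List.enumerate (pvPairs1 (PySem.List.pyRange 0 count 1) H) 0).filter
        (fun kp => !decide ((kp.2.2, kp.2.1) ∈
          PySem.List.slice (pvPairs1 (PySem.List.pyRange 0 count 1) H) none (some kp.1)))).map (fun kp => kp.2)).map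
        (fun p => !(decide (p.1 ∈ H) || decide (p.2 ∈ H))))
    = (PySem.List.pyRange 0 count 1).foldl (fun acc i =>
        (PySem.List.pyRange 0 count 1).foldl (fun acc j =>
          if i = j ∨ j ∈ hide then acc
          else if i ∉ hide ∧ j < i then acc
          else (acc.1 ++ [(i, j)], acc.2 ++ [decide (i ∉ hide)])) acc) ([], []) := by
  rw [pv_pairs2_eq_filter, pv_alt_eq]
  unfold pvPairs1
  rw [List.filter_flatMap]
  have hcomp : (fun i => List.filter (fun p => decide (p.1 ∈ H) || decide (p.1 < p.2))
        (((PySem.List.pyRange 0 count 1).filter (fun j => decide (i ≠ j) && !decide (j ∈ H))).map (fun j => (i, j))))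
      = fun i => ((PySem.List.pyRange 0 count 1).filter
          (fun j => decide (¬ (i = j ∨ j ∈ hide) ∧ ¬ (i ∉ hide ∧ j < i)))).map (fun j => (i, j)) := by
    funext i
    rw [List.filter_map, List.filter_filter]
    have : ((fun p => decide (p.1 ∈ H) || decide (p.1 < p.2)) ∘ fun j => (i, j)) = fun j =>
        (decide ((i, j).1 ∈ H) || decide ((i, j).1 < (i, j).2)) := rfl
    rw [this]
    congr 1
    exact List.filter_congr (fun j _ => pv_pred_eq H hide hmem i j)
  rw [hcomp, List.map_flatMap]
  refine congrArg₂ Prod.mk rfl ?_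
  refine List.flatMap_congr (fun i _ => ?_)
  rw [List.map_map]
  refine List.map_congr_left (fun j hj => ?_)
  have hjh : (¬ i = j ∧ j ∉ hide) ∧ (i ∈ hide ∨ i ≤ j) := by
    have := (List.mem_filter.mp hj).2
    simpa using this
  have hjH : j ∉ H := fun h => hjh.1.2 ((hmem j).mpr h)
  by_cases hiH : i ∈ H <;> simp [Function.comp, hiH, hjH, hmem]

-- ===== VERDICT (by name: the statement is the Claim_ definition above) =====
theorem generate_pairing_spec : Claim_equal_generate_pairing := by
  intro count step_hide _ _
  unfold Spec_generate_pairing generate_pairing generate_pairing_alt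
  cases step_hide with
  | none => exact pv_core count [] PySem.Set.empty (fun x => Iff.rfl)
  | some s =>
      exact pv_core count ((PySem.List.slice? (PySem.List.pyRange 0 count 1) none none s).getD [])
        (PySem.Set.ofList ((PySem.List.slice? (PySem.List.pyRange 0 count 1) none none s).getD []))
        (fun x => PySem.Set.mem_ofList _ x)
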